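-- pv_equiv track=rewrite | github.com/Vivatist/ALPACA-test-bench | src/processors/docx_processors.py | _format_extracted_text
-- ===== SOURCE A (Python) =====
-- from typing import Any, Dict, List, Optional
--
-- def _format_extracted_text(text: str) -> str:
--     """Нормализует текст, применяя простые эвристики для заголовков."""
--     if not text:
--         return ""
--
--     lines = text.split('\n')
--     cleaned_lines: List[str] = []
--
--     for line in lines:
--         stripped = line.strip()
--         if not stripped:
--             if cleaned_lines and cleaned_lines[-1]:
--                 cleaned_lines.append("")
--             continue
--
--         if len(stripped) < 100 and stripped.isupper():
--             cleaned_lines.append(f"# {stripped}")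
--         elif len(stripped) < 80 and not stripped.endswith('.'):
--             cleaned_lines.append(f"## {stripped}")
--         else:
--             cleaned_lines.append(stripped)
--
--     return '\n'.join(cleaned_lines)
-- ===== SOURCE B (Python) =====
-- from itertools import groupby
--
--
-- def _fmt(s: str) -> str:
--     if len(s) < 100 and s.isupper():
--         return '# ' + s
--     if len(s) < 80 and not s.endswith('.'):
--         return '## ' + s
--     return s
--
--
-- def _format_extracted_text(text: str) -> str:
--     """Group-then-emit: groupby on blank/non-blank runs instead of a stateful per-line loop."""
--     if not text:
--         return ""
--     out = []
--     for is_blank, group in groupby(text.split('\n'), key=lambda l: l.strip() == ''):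
--         if is_blank:
--             if out and out[-1]:
--                 out.append('')
--         else:
--             for line in group:
--                 out.append(_fmt(line.strip()))
--     return '\n'.join(out)
-- ===== Notes on version B (the rewrite author's own statement) =====
-- stated objective: alternative
-- what changed: Replaces A's stateful per-line loop (which re-checks the output's last element on every blank line) with an itertools.groupby pass over maximal blank/non-blank runs: each non-blank run emits its formatted lines, each blank run emits at most one separator.
import Mathlib
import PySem

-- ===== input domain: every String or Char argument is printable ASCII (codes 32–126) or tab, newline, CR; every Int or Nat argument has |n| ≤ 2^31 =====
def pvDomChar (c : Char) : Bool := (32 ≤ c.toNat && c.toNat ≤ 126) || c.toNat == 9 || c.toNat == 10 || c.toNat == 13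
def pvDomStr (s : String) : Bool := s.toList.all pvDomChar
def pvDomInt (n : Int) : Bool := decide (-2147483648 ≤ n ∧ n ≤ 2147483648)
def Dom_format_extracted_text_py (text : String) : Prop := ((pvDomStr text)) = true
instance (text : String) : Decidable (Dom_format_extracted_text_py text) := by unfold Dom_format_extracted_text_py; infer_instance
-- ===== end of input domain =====

-- B changes the decomposition: one groupby pass over blank/non-blank runs instead of A's
-- stateful per-line loop inspecting the output's last element on every blank line (objective: alternative).

-- Python str.isupper(), exact on ASCII: some cased char, and no lowercase char.
def pvStrIsupper (s : List Char) : Bool :=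
  s.any PySem.Chars.isupper && s.all (fun c => !PySem.Chars.islower c)

-- ===== PORT A =====
-- A's loop body: per line, blank lines collapse against the output's last element.
def pvStepA (acc : List (List Char)) (line : List Char) : List (List Char) :=
  let stripped := PySem.Chars.strip line
  if stripped == [] then
    if (acc.getLast?.getD []) ≠ [] then acc ++ [[]] else acc
  else if PySem.Chars.len stripped < 100 && pvStrIsupper stripped then
    acc ++ ['#' :: ' ' :: stripped]
  else if PySem.Chars.len stripped < 80 && !(PySem.Chars.endswith stripped ['.']) then
    acc ++ ['#' :: '#' :: ' ' :: stripped]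
  else
    acc ++ [stripped]

def format_extracted_text_py (text : String) : String :=
  if text == "" then ""
  else
    let lines := PySem.Chars.splitOn text.toList ['\n']
    let cleaned := lines.foldl pvStepA []
    String.ofList (PySem.Chars.join ['\n'] cleaned)

-- ===== PORT B =====
def pvIsBlank (line : List Char) : Bool := PySem.Chars.strip line == []

def pvFmt (stripped : List Char) : List Char :=
  if PySem.Chars.len stripped < 100 && pvStrIsupper stripped then '#' :: ' ' :: stripped
  else if PySem.Chars.len stripped < 80 && !(PySem.Chars.endswith stripped ['.']) then
    '#' :: '#' :: ' ' :: stripped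
  else stripped

-- itertools.groupby over the blank/non-blank key: maximal runs tagged with their key.
def pvGroupRuns (l : List (List Char)) : List (Bool × List (List Char)) :=
  match l with
  | [] => []
  | x :: xs =>
    (pvIsBlank x, x :: xs.takeWhile (fun y => pvIsBlank y == pvIsBlank x)) ::
      pvGroupRuns (xs.dropWhile (fun y => pvIsBlank y == pvIsBlank x))
termination_by l.length
decreasing_by
  simpa using Nat.lt_succ_of_le (List.length_dropWhile_le _ _)

def pvStepB (out : List (List Char)) (g : Bool × List (List Char)) : List (List Char) :=
  if g.1 then
    if (out.getLast?.getD []) ≠ [] then out ++ [[]] else out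
  else
    g.2.foldl (fun o line => o ++ [pvFmt (PySem.Chars.strip line)]) out

def format_extracted_text_py_alt (text : String) : String :=
  if text == "" then ""
  else
    String.ofList (PySem.Chars.join ['\n']
      ((pvGroupRuns (PySem.Chars.splitOn text.toList ['\n'])).foldl pvStepB []))

-- ===== PRECONDITION & SPEC =====
def Spec_format_extracted_text_py (text : String) (out : String) : Prop := out = format_extracted_text_py_alt text
instance (text : String) (out : String) : Decidable (Spec_format_extracted_text_py text out) := by unfold Spec_format_extracted_text_py; infer_instance

-- ===== CLAIM (what is proved, stated in full; the proofs are below) =====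
def Claim_equal_format_extracted_text_py : Prop := ∀ (text : String), Dom_format_extracted_text_py text → Spec_format_extracted_text_py text (format_extracted_text_py text)

-- ===== LEMMAS AND PROOFS =====

-- On a blank line, A's step is the blank-group emission.
theorem stepA_blank (acc : List (List Char)) (line : List Char) (h : pvIsBlank line = true) :
    pvStepA acc line = if (acc.getLast?.getD []) ≠ [] then acc ++ [[]] else acc := by
  simp only [pvIsBlank] at h
  simp [pvStepA, h]

-- On a non-blank line, A's step appends the formatted line.
theorem stepA_nonblank (acc : List (List Char)) (line : List Char) (h : pvIsBlank line = false) :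
    pvStepA acc line = acc ++ [pvFmt (PySem.Chars.strip line)] := by
  simp only [pvIsBlank] at h
  simp only [pvStepA, pvFmt, h]
  split_ifs <;> simp_all

-- Once the output ends in [] (or is empty), further blank lines are no-ops.
theorem foldA_blank_noop (t : List (List Char)) (acc : List (List Char))
    (ht : ∀ y ∈ t, pvIsBlank y = true) (hl : acc.getLast?.getD [] = []) :
    t.foldl pvStepA acc = acc := by
  induction t with
  | nil => rfl
  | cons y ys ih =>
    have hy := ht y (List.mem_cons_self ..)
    have hstep : pvStepA acc y = acc := by rw [stepA_blank _ _ hy]; simp [hl]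
    rw [List.foldl_cons, hstep, ih (fun z hz => ht z (List.mem_cons_of_mem _ hz))]

-- A's fold over a run of blank lines = one blank-group emission.
theorem foldA_blank_run (x : List Char) (t : List (List Char)) (acc : List (List Char))
    (hx : pvIsBlank x = true) (ht : ∀ y ∈ t, pvIsBlank y = true) :
    (x :: t).foldl pvStepA acc =
      if (acc.getLast?.getD []) ≠ [] then acc ++ [[]] else acc := by
  rw [List.foldl_cons, stepA_blank _ _ hx]
  by_cases h : (acc.getLast?.getD []) ≠ []
  · rw [if_pos h]
    exact foldA_blank_noop t _ ht (by simp)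
  · rw [if_neg h]
    exact foldA_blank_noop t _ ht (by simpa using h)

-- A's fold over a run of non-blank lines = appending each formatted line.
theorem foldA_nonblank_run (g : List (List Char)) (acc : List (List Char))
    (hg : ∀ y ∈ g, pvIsBlank y = false) :
    g.foldl pvStepA acc = g.foldl (fun o line => o ++ [pvFmt (PySem.Chars.strip line)]) acc := by
  induction g generalizing acc with
  | nil => rfl
  | cons y ys ih =>
    rw [List.foldl_cons, List.foldl_cons, stepA_nonblank _ _ (hg y (List.mem_cons_self ..))]
    exact ih _ (fun z hz => hg z (List.mem_cons_of_mem _ hz))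

-- Main invariant: A's per-line fold equals B's fold over the grouped runs, for any accumulator.
theorem foldA_eq_foldB :
    ∀ (l : List (List Char)) (acc : List (List Char)),
      l.foldl pvStepA acc = (pvGroupRuns l).foldl pvStepB acc
  | [], _ => by simp [pvGroupRuns]
  | x :: xs, acc => by
    have hsplit : x :: xs =
        (x :: xs.takeWhile (fun y => pvIsBlank y == pvIsBlank x)) ++
          xs.dropWhile (fun y => pvIsBlank y == pvIsBlank x) := by
      simp [List.takeWhile_append_dropWhile]
    conv_rhs => rw [pvGroupRuns, List.foldl_cons]
    conv_lhs => rw [hsplit, List.foldl_append,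
      foldA_eq_foldB (xs.dropWhile (fun y => pvIsBlank y == pvIsBlank x))]
    congr 1
    cases hx : pvIsBlank x with
    | true =>
      rw [foldA_blank_run x _ acc hx
        (fun y hy => by simpa using List.mem_takeWhile_imp hy)]
      simp [pvStepB]
    | false =>
      have hall : ∀ y ∈ x :: xs.takeWhile (fun y => pvIsBlank y == false),
          pvIsBlank y = false := by
        intro y hy
        rcases List.mem_cons.mp hy with h | h
        · simpa [h] using hx
        · simpa using List.mem_takeWhile_imp h
      rw [foldA_nonblank_run _ acc hall]
      simp [pvStepB]
termination_by l => l.length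
decreasing_by
  simpa using Nat.lt_succ_of_le (List.length_dropWhile_le _ _)

-- ===== VERDICT (by name: the statement is the Claim_ definition above) =====
theorem format_extracted_text_py_spec : Claim_equal_format_extracted_text_py := by
  intro text _
  unfold Spec_format_extracted_text_py format_extracted_text_py format_extracted_text_py_alt
  cases h : (text == "") with
  | true => simp [h]
  | false =>
    simp only [h, Bool.false_eq_true, if_false]
    rw [foldA_eq_foldB]
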